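-- pv_equiv track=rewrite | github.com/shyamjiyadav28/ShyamjiYadav_2410030344_IILM-GN | Maximum People Visible in a Line.py | maxPeople
-- ===== SOURCE A (Python) =====
-- def maxPeople(arr):
--     n = len(arr)
--
--     left = [0] * n
--     right = [0] * n
--
--     stack = []
--
--     # Count visible to the left
--     for i in range(n):
--         while stack and arr[stack[-1]] < arr[i]:
--             stack.pop()
--
--         left[i] = i - stack[-1] - 1 if stack else i
--         stack.append(i)
--
--     stack.clear()
--
--     # Count visible to the right
--     for i in range(n-1, -1, -1):
--         while stack and arr[stack[-1]] < arr[i]: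
--             stack.pop()
--
--         right[i] = stack[-1] - i - 1 if stack else n - i - 1
--         stack.append(i)
--
--     max_seen = 0
--
--     for i in range(n):
--         max_seen = max(max_seen, left[i] + right[i] + 1)
--
--     return max_seen
-- ===== SOURCE B (Python) =====
-- def maxPeople(arr):
--     n = len(arr)
--     # prev[i] = index of the nearest element >= arr[i] to the left, or -1;
--     # found by jumping along earlier prev-pointers instead of keeping a stack.
--     prev = [-1] * n
--     for i in range(n):
--         j = i - 1
--         while j != -1 and arr[j] < arr[i]:
--             j = prev[j]
--         prev[i] = j
--     # nxt[i] = index of the nearest element >= arr[i] to the right, or n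
--     nxt = [n] * n
--     for i in range(n - 1, -1, -1):
--         j = i + 1
--         while j != n and arr[j] < arr[i]:
--             j = nxt[j]
--         nxt[i] = j
--     best = 0
--     for i in range(n):
--         best = max(best, nxt[i] - prev[i] - 1)
--     return best
-- ===== Notes on version B (the rewrite author's own statement) =====
-- stated objective: alternative
-- what changed: Replaces the two explicit monotonic-stack passes (and the left/right width arrays) by stack-free pointer jumping: arrays prev/nxt of the nearest >= index on each side are computed by chasing previously computed pointers, and the answer is the maximum of nxt[i]-prev[i]-1.
import Mathlib
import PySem

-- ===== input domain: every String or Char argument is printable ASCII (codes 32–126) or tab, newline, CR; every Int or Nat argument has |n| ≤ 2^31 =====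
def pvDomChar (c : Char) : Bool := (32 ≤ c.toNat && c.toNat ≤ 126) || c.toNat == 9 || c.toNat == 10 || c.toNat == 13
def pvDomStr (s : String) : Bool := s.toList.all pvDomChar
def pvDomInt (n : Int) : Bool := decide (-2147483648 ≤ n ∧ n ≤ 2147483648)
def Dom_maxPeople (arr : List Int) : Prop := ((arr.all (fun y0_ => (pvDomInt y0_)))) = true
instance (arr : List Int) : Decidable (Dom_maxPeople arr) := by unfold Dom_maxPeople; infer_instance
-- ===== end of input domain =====

-- B replaces A's two monotonic-stack passes and left/right width arrays by stack-free
-- pointer jumping: nearest->= index arrays prev/nxt found by chasing earlier pointers,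
-- answer = max of nxt[i]-prev[i]-1 (alternative linear algorithm, no speed claim).

-- ===== PORT A =====
-- `while stack and arr[stack[-1]] < arr[i]: stack.pop()` — stack top at head;
-- every index on the stack comes from range(n), so `getD _ 0` is exact Python indexing.
def popStack (arr : List Int) (x : Int) : List Nat → List Nat
  | [] => []
  | t :: rest => if arr.getD t 0 < x then popStack arr x rest else t :: rest

-- one iteration of A's first loop: `left[i] = …` (sequential assignment = append), `stack.append(i)`
def leftStep (arr : List Int) (st : List Int × List Nat) (i : Nat) : List Int × List Nat :=
  let s := popStack arr (arr.getD i 0) st.2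
  (st.1 ++ [match s with
            | [] => (i : Int)
            | k :: _ => (i : Int) - (k : Int) - 1], i :: s)

-- one iteration of A's second loop (i runs downward, so the assigned value is consed in front)
def rightStep (arr : List Int) (st : List Int × List Nat) (i : Nat) : List Int × List Nat :=
  let s := popStack arr (arr.getD i 0) st.2
  ((match s with
    | [] => (arr.length : Int) - (i : Int) - 1
    | k :: _ => (k : Int) - (i : Int) - 1) :: st.1, i :: s)

def maxPeople (arr : List Int) : Int :=
  let n := arr.length
  let left := ((List.range n).foldl (leftStep arr) ([], [])).1
  let right := ((List.range n).reverse.foldl (rightStep arr) ([], [])).1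
  (List.range n).foldl (fun m i => max m (left.getD i 0 + right.getD i 0 + 1)) 0

-- ===== PORT B =====
-- `while j != -1 and arr[j] < arr[i]: j = prev[j]` — the jump index strictly decreases,
-- so `fuel` never runs out at its call site (fuel = i+1); fuel only makes the loop total.
-- Every index read is in range, so `getD _ 0` / `toNat` are exact Python indexing here.
def jumpPrev (arr : List Int) (prev : List Int) (x : Int) : Nat → Int → Int
  | 0, j => j
  | fuel + 1, j =>
    if j = -1 then j
    else if arr.getD j.toNat 0 < x then jumpPrev arr prev x fuel (prev.getD j.toNat 0)
    else j

-- `while j != n and arr[j] < arr[i]: j = nxt[j]` — the jump index strictly increases,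
-- so `fuel` never runs out at its call site (fuel = n-i)
def jumpNext (arr : List Int) (nxt : List Int) (x : Int) : Nat → Int → Int
  | 0, j => j
  | fuel + 1, j =>
    if j = (arr.length : Int) then j
    else if arr.getD j.toNat 0 < x then jumpNext arr nxt x fuel (nxt.getD j.toNat 0)
    else j

-- `prev = [-1]*n` then `prev[i] = j` = List.set; the second loop runs i downward
def maxPeople_alt (arr : List Int) : Int :=
  let n := arr.length
  let prev := (List.range n).foldl
    (fun p i => p.set i (jumpPrev arr p (arr.getD i 0) (i + 1) ((i : Int) - 1)))
    (List.replicate n (-1))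
  let nxt := (List.range n).reverse.foldl
    (fun q i => q.set i (jumpNext arr q (arr.getD i 0) (n - i) ((i : Int) + 1)))
    (List.replicate n (n : Int))
  (List.range n).foldl (fun best i => max best (nxt.getD i 0 - prev.getD i 0 - 1)) 0


-- ===== PRECONDITION & SPEC =====
def Spec_maxPeople (arr : List Int) (out : Int) : Prop := out = maxPeople_alt arr
instance (arr : List Int) (out : Int) : Decidable (Spec_maxPeople arr out) := by unfold Spec_maxPeople; infer_instance

-- ===== CLAIM (what is proved, stated in full; the proofs are below) =====
def Claim_equal_maxPeople : Prop := ∀ (arr : List Int), Dom_maxPeople arr → Spec_maxPeople arr (maxPeople arr)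

-- ===== LEMMAS AND PROOFS =====

-- the "count of consecutive smaller values" both programs compute, and per-index forms
def countWhileLt (h : Int) : List Int → Int
  | [] => 0
  | v :: t => if h ≤ v then 0 else 1 + countWhileLt h t

def specL (arr : List Int) (i : Nat) : Int :=
  countWhileLt (arr.getD i 0) (arr.take i).reverse
def specR (arr : List Int) (i : Nat) : Int :=
  countWhileLt (arr.getD i 0) (arr.drop (i+1))

-- the pointer values B's arrays hold
def prevVal (arr : List Int) (i : Nat) : Int := (i : Int) - specL arr i - 1
def nxtVal (arr : List Int) (i : Nat) : Int := (i : Int) + specR arr i + 1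

-- the stack A's first loop holds before processing index i
def stackL (arr : List Int) : Nat → List Nat
  | 0 => []
  | i + 1 => i :: popStack arr (arr.getD i 0) (stackL arr i)

-- the stack A's second loop holds after processing indices i..n-1 (before processing i-1)
def stackR (arr : List Int) (i : Nat) : List Nat :=
  if h : i < arr.length then i :: popStack arr (arr.getD i 0) (stackR arr (i+1)) else []
termination_by arr.length - i

lemma popStack_sublist (arr : List Int) (x : Int) (s : List Nat) :
    List.Sublist (popStack arr x s) s := by
  induction s with
  | nil => simp [popStack]
  | cons t rest ih =>
    simp only [popStack]
    split
    · exact ih.trans (List.sublist_cons_self t rest)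
    · exact List.Sublist.refl _

lemma mem_popStack_le (arr : List Int) (x : Int) (s : List Nat)
    (hp : s.Pairwise (fun a b => arr.getD a 0 ≤ arr.getD b 0))
    {t : Nat} (ht : t ∈ popStack arr x s) : x ≤ arr.getD t 0 := by
  induction s with
  | nil => simp [popStack] at ht
  | cons a rest ih =>
    simp only [popStack] at ht
    rcases List.pairwise_cons.mp hp with ⟨ha, hrest⟩
    split at ht
    · exact ih hrest ht
    · rcases List.mem_cons.mp ht with rfl | h
      · omega
      · exact le_trans (by omega) (ha _ h)

lemma popStack_decomp (arr : List Int) (x : Int) (s : List Nat) :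
    ∃ s1, s = s1 ++ popStack arr x s ∧ ∀ t ∈ s1, arr.getD t 0 < x := by
  induction s with
  | nil => exact ⟨[], by simp [popStack]⟩
  | cons a rest ih =>
    simp only [popStack]
    split
    · rcases ih with ⟨s1, h1, h2⟩
      refine ⟨a :: s1, by simpa using h1, ?_⟩
      intro t ht
      rcases List.mem_cons.mp ht with rfl | h
      · assumption
      · exact h2 _ h
    · exact ⟨[], by simp⟩

-- countWhileLt counts up to the first stopping index j
lemma countWhileLt_eq_of (h : Int) (l : List Int) (j : Nat) (hj : j ≤ l.length)
    (hlt : ∀ m (hm : m < j), l[m]'(lt_of_lt_of_le hm hj) < h)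
    (hstop : j = l.length ∨ ∃ hjl : j < l.length, h ≤ l[j]) :
    countWhileLt h l = (j : Int) := by
  induction l generalizing j with
  | nil =>
    have hj0 : j = 0 := by simpa using hj
    subst hj0; simp [countWhileLt]
  | cons v t ih =>
    cases j with
    | zero =>
      rcases hstop with h0 | ⟨hjl, hle⟩
      · simp at h0
      · simp only [List.getElem_cons_zero] at hle
        simp [countWhileLt, hle]
    | succ j' =>
      have hv : v < h := by simpa using hlt 0 (Nat.succ_pos _)
      simp only [countWhileLt, if_neg (not_le.mpr hv)]
      have := ih j' (by simpa using hj)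
        (fun m hm => by simpa using hlt (m+1) (by omega))
        (by
          rcases hstop with h0 | ⟨hjl, hle⟩
          · left; simpa using h0
          · right; exact ⟨by simpa using hjl, by simpa using hle⟩)
      rw [this]; push_cast; ring

-- invariants of A's left stack
lemma stackR_pos (arr : List Int) (i : Nat) (h : i < arr.length) :
    stackR arr i = i :: popStack arr (arr.getD i 0) (stackR arr (i+1)) := by
  rw [stackR]; exact dif_pos h

lemma stackR_neg (arr : List Int) (i : Nat) (h : ¬ i < arr.length) :
    stackR arr i = [] := by
  rw [stackR]; exact dif_neg h

lemma getElem_revtake (arr : List Int) (i m : Nat) (hi : i ≤ arr.length) (hm : m < i)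
    (h' : m < ((arr.take i).reverse).length) :
    ((arr.take i).reverse)[m] = arr.getD (i - 1 - m) 0 := by
  have hlen : (arr.take i).length = i := by simp [hi]
  rw [List.getElem_reverse, List.getElem_take, List.getD_eq_getElem _ _ (by omega)]
  congr 1
  omega

lemma len_revtake (arr : List Int) (i : Nat) (hi : i ≤ arr.length) :
    ((arr.take i).reverse).length = i := by simp [hi]

lemma getElem_dropsucc (arr : List Int) (i m : Nat) (h' : m < (arr.drop (i+1)).length) :
    (arr.drop (i+1))[m] = arr.getD (i + 1 + m) 0 := by
  rw [List.getElem_drop, List.getD_eq_getElem _ _ (by simp at h'; omega)]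

lemma stackL_inv (arr : List Int) (i : Nat) :
    (∀ j ∈ stackL arr i, j < i) ∧
    (stackL arr i).Pairwise (fun a b => b < a) ∧
    (stackL arr i).Pairwise (fun a b => arr.getD a 0 ≤ arr.getD b 0) ∧
    (∀ m, m < i → m ∉ stackL arr i →
      ∃ j ∈ stackL arr i, m < j ∧ arr.getD m 0 < arr.getD j 0) := by
  induction i with
  | zero => simp [stackL]
  | succ i ih =>
    obtain ⟨ha, hb, hc, hd⟩ := ih
    have hsub := popStack_sublist arr (arr.getD i 0) (stackL arr i)
    have hmem : ∀ j ∈ popStack arr (arr.getD i 0) (stackL arr i), j ∈ stackL arr i :=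
      fun j hj => hsub.subset hj
    obtain ⟨s1, hdec, hs1⟩ := popStack_decomp arr (arr.getD i 0) (stackL arr i)
    refine ⟨?_, ?_, ?_, ?_⟩ <;> simp only [stackL]
    · intro j hj
      rcases List.mem_cons.mp hj with rfl | hj
      · omega
      · exact Nat.lt_succ_of_lt (ha j (hmem j hj))
    · exact List.pairwise_cons.mpr ⟨fun j hj => ha j (hmem j hj), hb.sublist hsub⟩
    · exact List.pairwise_cons.mpr ⟨fun j hj => mem_popStack_le arr _ _ hc hj, hc.sublist hsub⟩
    · intro m hm hmni
      have hmne : m ≠ i := fun h => hmni (h ▸ List.mem_cons_self ..)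
      have hm' : m < i := by omega
      have hmns' : m ∉ popStack arr (arr.getD i 0) (stackL arr i) :=
        fun h => hmni (List.mem_cons_of_mem _ h)
      by_cases hms : m ∈ stackL arr i
      · have hm1 : m ∈ s1 := by
          rw [hdec] at hms
          rcases List.mem_append.mp hms with h | h
          · exact h
          · exact absurd h hmns'
        exact ⟨i, List.mem_cons_self .., hm', hs1 m hm1⟩
      · obtain ⟨j, hjmem, hmj, hfm⟩ := hd m hm' hms
        by_cases hjs : j ∈ popStack arr (arr.getD i 0) (stackL arr i)
        · exact ⟨j, List.mem_cons_of_mem _ hjs, hmj, hfm⟩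
        · have hj1 : j ∈ s1 := by
            rw [hdec] at hjmem
            rcases List.mem_append.mp hjmem with h | h
            · exact h
            · exact absurd h hjs
          exact ⟨i, List.mem_cons_self .., hm', lt_trans hfm (hs1 j hj1)⟩

-- the value A stores in left[i] is B's left count
lemma leftVal (arr : List Int) (i : Nat) (hi : i < arr.length) :
    (match popStack arr (arr.getD i 0) (stackL arr i) with
     | [] => (i : Int)
     | k :: _ => (i : Int) - (k : Int) - 1) = specL arr i := by
  obtain ⟨ha, hb, hc, hd⟩ := stackL_inv arr i
  have hsub := popStack_sublist arr (arr.getD i 0) (stackL arr i)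
  obtain ⟨s1, hdec, hs1⟩ := popStack_decomp arr (arr.getD i 0) (stackL arr i)
  have hile : i ≤ arr.length := le_of_lt hi
  cases hpop : popStack arr (arr.getD i 0) (stackL arr i) with
  | nil =>
    have hall : ∀ m, m < i → arr.getD m 0 < arr.getD i 0 := by
      intro m hm
      by_cases hms : m ∈ stackL arr i
      · refine hs1 m ?_
        rw [hdec, hpop] at hms; simpa using hms
      · obtain ⟨j, hj, _, hfm⟩ := hd m hm hms
        refine lt_trans hfm (hs1 j ?_)
        rw [hdec, hpop] at hj; simpa using hj
    refine (countWhileLt_eq_of _ _ i (by rw [len_revtake arr i hile]) ?_ ?_).symm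
    · intro m hm
      rw [getElem_revtake arr i m hile hm]
      exact hall _ (by omega)
    · left; rw [len_revtake arr i hile]
  | cons k rest =>
    have hks : k ∈ stackL arr i := hsub.subset (by rw [hpop]; exact List.mem_cons_self ..)
    have hki : k < i := ha k hks
    have hfk : arr.getD i 0 ≤ arr.getD k 0 :=
      mem_popStack_le arr _ _ hc (by rw [hpop]; exact List.mem_cons_self ..)
    have hrest : ∀ m ∈ rest, m < k := by
      have := (hb.sublist hsub)
      rw [hpop] at this
      exact fun m hm => (List.pairwise_cons.mp this).1 m hm
    have hmid : ∀ m, k < m → m < i → arr.getD m 0 < arr.getD i 0 := by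
      intro m hkm hmi
      by_cases hms : m ∈ stackL arr i
      · refine hs1 m ?_
        rw [hdec, hpop] at hms
        rcases List.mem_append.mp hms with h | h
        · exact h
        · rcases List.mem_cons.mp h with rfl | h
          · omega
          · exact absurd (hrest m h) (by omega)
      · obtain ⟨j, hj, hmj, hfm⟩ := hd m hmi hms
        refine lt_trans hfm (hs1 j ?_)
        rw [hdec, hpop] at hj
        rcases List.mem_append.mp hj with h | h
        · exact h
        · rcases List.mem_cons.mp h with rfl | h
          · omega
          · exact absurd (hrest j h) (by omega)
    have hcnt : countWhileLt (arr.getD i 0) (arr.take i).reverse = ((i - 1 - k : Nat) : Int) := by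
      refine countWhileLt_eq_of _ _ (i - 1 - k) (by rw [len_revtake arr i hile]; omega) ?_ ?_
      · intro m hm
        rw [getElem_revtake arr i m hile (by omega)]
        exact hmid _ (by omega) (by omega)
      · right
        refine ⟨by rw [len_revtake arr i hile]; omega, ?_⟩
        rw [getElem_revtake arr i _ hile (by omega)]
        have : i - 1 - (i - 1 - k) = k := by omega
        rw [this]
        exact hfk
    show (i : Int) - (k : Int) - 1 = specL arr i
    unfold specL
    rw [hcnt]
    omega

lemma leftFold (arr : List Int) (i : Nat) (hi : i ≤ arr.length) :
    (List.range i).foldl (leftStep arr) ([], []) =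
      ((List.range i).map (specL arr), stackL arr i) := by
  induction i with
  | zero => simp [stackL]
  | succ i ih =>
    rw [List.range_succ, List.foldl_append, ih (by omega), List.map_append]
    simp only [List.foldl_cons, List.foldl_nil, leftStep, List.map_cons, List.map_nil]
    refine Prod.ext ?_ rfl
    simp only
    rw [leftVal arr i (by omega)]

-- invariants of A's right stack
lemma stackR_inv (arr : List Int) (i : Nat) :
    (∀ j ∈ stackR arr i, i ≤ j ∧ j < arr.length) ∧
    (stackR arr i).Pairwise (fun a b => a < b) ∧
    (stackR arr i).Pairwise (fun a b => arr.getD a 0 ≤ arr.getD b 0) ∧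
    (∀ m, i ≤ m → m < arr.length → m ∉ stackR arr i →
      ∃ j ∈ stackR arr i, j < m ∧ arr.getD m 0 < arr.getD j 0) := by
  have key : ∀ (d i : Nat), arr.length ≤ i + d →
      (∀ j ∈ stackR arr i, i ≤ j ∧ j < arr.length) ∧
      (stackR arr i).Pairwise (fun a b => a < b) ∧
      (stackR arr i).Pairwise (fun a b => arr.getD a 0 ≤ arr.getD b 0) ∧
      (∀ m, i ≤ m → m < arr.length → m ∉ stackR arr i →
        ∃ j ∈ stackR arr i, j < m ∧ arr.getD m 0 < arr.getD j 0) := by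
    intro d
    induction d with
    | zero =>
      intro i hgood
      rw [stackR_neg arr i (by omega)]
      exact ⟨by simp, by simp, by simp, fun m hm hm' => by omega⟩
    | succ d ih =>
      intro i hgood
      by_cases h : i < arr.length
      · obtain ⟨ha, hb, hc, hd⟩ := ih (i+1) (by omega)
        have hsub := popStack_sublist arr (arr.getD i 0) (stackR arr (i+1))
        have hmem : ∀ j ∈ popStack arr (arr.getD i 0) (stackR arr (i+1)), j ∈ stackR arr (i+1) :=
          fun j hj => hsub.subset hj
        obtain ⟨s1, hdec, hs1⟩ := popStack_decomp arr (arr.getD i 0) (stackR arr (i+1))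
        rw [stackR_pos arr i h]
        refine ⟨?_, ?_, ?_, ?_⟩
        · intro j hj
          rcases List.mem_cons.mp hj with rfl | hj
          · omega
          · have := ha j (hmem j hj); omega
        · exact List.pairwise_cons.mpr ⟨fun j hj => by have := ha j (hmem j hj); omega,
            hb.sublist hsub⟩
        · exact List.pairwise_cons.mpr ⟨fun j hj => mem_popStack_le arr _ _ hc hj,
            hc.sublist hsub⟩
        · intro m hm hmlen hmni
          have hmne : m ≠ i := fun hmi => hmni (hmi ▸ List.mem_cons_self ..)
          have hm' : i + 1 ≤ m := by omega
          have hmns' : m ∉ popStack arr (arr.getD i 0) (stackR arr (i+1)) :=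
            fun hx => hmni (List.mem_cons_of_mem _ hx)
          by_cases hms : m ∈ stackR arr (i+1)
          · have hm1 : m ∈ s1 := by
              rw [hdec] at hms
              rcases List.mem_append.mp hms with hx | hx
              · exact hx
              · exact absurd hx hmns'
            exact ⟨i, List.mem_cons_self .., by omega, hs1 m hm1⟩
          · obtain ⟨j, hjmem, hmj, hfm⟩ := hd m hm' hmlen hms
            by_cases hjs : j ∈ popStack arr (arr.getD i 0) (stackR arr (i+1))
            · exact ⟨j, List.mem_cons_of_mem _ hjs, hmj, hfm⟩
            · have hj1 : j ∈ s1 := by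
                rw [hdec] at hjmem
                rcases List.mem_append.mp hjmem with hx | hx
                · exact hx
                · exact absurd hx hjs
              exact ⟨i, List.mem_cons_self .., by omega, lt_trans hfm (hs1 j hj1)⟩
      · rw [stackR_neg arr i h]
        exact ⟨by simp, by simp, by simp, fun m hm hm' => by omega⟩
  exact key arr.length i (by omega)

-- the value A stores in right[i] is B's right count
lemma rightVal (arr : List Int) (i : Nat) (hi : i < arr.length) :
    (match popStack arr (arr.getD i 0) (stackR arr (i+1)) with
     | [] => (arr.length : Int) - (i : Int) - 1
     | k :: _ => (k : Int) - (i : Int) - 1) = specR arr i := by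
  obtain ⟨ha, hb, hc, hd⟩ := stackR_inv arr (i+1)
  have hsub := popStack_sublist arr (arr.getD i 0) (stackR arr (i+1))
  obtain ⟨s1, hdec, hs1⟩ := popStack_decomp arr (arr.getD i 0) (stackR arr (i+1))
  have hlen : (arr.drop (i+1)).length = arr.length - (i+1) := by simp
  cases hpop : popStack arr (arr.getD i 0) (stackR arr (i+1)) with
  | nil =>
    have hall : ∀ m, i < m → m < arr.length → arr.getD m 0 < arr.getD i 0 := by
      intro m hm hmlen
      by_cases hms : m ∈ stackR arr (i+1)
      · refine hs1 m ?_
        rw [hdec, hpop] at hms; simpa using hms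
      · obtain ⟨j, hj, _, hfm⟩ := hd m (by omega) hmlen hms
        refine lt_trans hfm (hs1 j ?_)
        rw [hdec, hpop] at hj; simpa using hj
    have hcnt : countWhileLt (arr.getD i 0) (arr.drop (i+1)) = ((arr.length - (i+1) : Nat) : Int) := by
      refine countWhileLt_eq_of _ _ (arr.length - (i+1)) (by omega) ?_ ?_
      · intro m hm
        rw [getElem_dropsucc arr i m]
        exact hall _ (by omega) (by omega)
      · left; omega
    show (arr.length : Int) - (i : Int) - 1 = specR arr i
    unfold specR
    rw [hcnt]
    omega
  | cons k rest =>
    have hks : k ∈ stackR arr (i+1) := hsub.subset (by rw [hpop]; exact List.mem_cons_self ..)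
    have hki : i + 1 ≤ k ∧ k < arr.length := ha k hks
    have hfk : arr.getD i 0 ≤ arr.getD k 0 :=
      mem_popStack_le arr _ _ hc (by rw [hpop]; exact List.mem_cons_self ..)
    have hrest : ∀ m ∈ rest, k < m := by
      have := (hb.sublist hsub)
      rw [hpop] at this
      exact fun m hm => (List.pairwise_cons.mp this).1 m hm
    have hmid : ∀ m, i < m → m < k → arr.getD m 0 < arr.getD i 0 := by
      intro m him hmk
      by_cases hms : m ∈ stackR arr (i+1)
      · refine hs1 m ?_
        rw [hdec, hpop] at hms
        rcases List.mem_append.mp hms with hx | hx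
        · exact hx
        · rcases List.mem_cons.mp hx with rfl | hx
          · omega
          · exact absurd (hrest m hx) (by omega)
      · obtain ⟨j, hj, hjm, hfm⟩ := hd m (by omega) (by omega) hms
        refine lt_trans hfm (hs1 j ?_)
        rw [hdec, hpop] at hj
        rcases List.mem_append.mp hj with hx | hx
        · exact hx
        · rcases List.mem_cons.mp hx with rfl | hx
          · omega
          · exact absurd (hrest j hx) (by omega)
    have hcnt : countWhileLt (arr.getD i 0) (arr.drop (i+1)) = ((k - i - 1 : Nat) : Int) := by
      refine countWhileLt_eq_of _ _ (k - i - 1) (by omega) ?_ ?_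
      · intro m hm
        rw [getElem_dropsucc arr i m]
        exact hmid _ (by omega) (by omega)
      · right
        refine ⟨by omega, ?_⟩
        rw [getElem_dropsucc arr i _]
        have : i + 1 + (k - i - 1) = k := by omega
        rw [this]
        exact hfk
    show (k : Int) - (i : Int) - 1 = specR arr i
    unfold specR
    rw [hcnt]
    omega

lemma rightFold (arr : List Int) (i : Nat) (hi : i ≤ arr.length) :
    (List.range' i (arr.length - i)).reverse.foldl (rightStep arr) ([], []) =
      ((List.range' i (arr.length - i)).map (specR arr), stackR arr i) := by
  have key : ∀ (d i : Nat), arr.length ≤ i + d → i ≤ arr.length →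
      (List.range' i (arr.length - i)).reverse.foldl (rightStep arr) ([], []) =
        ((List.range' i (arr.length - i)).map (specR arr), stackR arr i) := by
    intro d
    induction d with
    | zero =>
      intro i hgood hile
      have : arr.length - i = 0 := by omega
      rw [this, stackR_neg arr i (by omega)]
      simp
    | succ d ih =>
      intro i hgood hile
      by_cases h : i < arr.length
      · have hc : arr.length - i = (arr.length - (i+1)) + 1 := by omega
        rw [hc, List.range'_succ, List.reverse_cons, List.foldl_append,
          ih (i+1) (by omega) (by omega), List.map_cons]
        simp only [List.foldl_cons, List.foldl_nil, rightStep]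
        rw [stackR_pos arr i h]
        refine Prod.ext ?_ rfl
        simp only
        rw [rightVal arr i h]
      · have h0 : arr.length - i = 0 := by omega
        rw [h0, stackR_neg arr i h]
        simp
  exact key arr.length i (by omega) hi

lemma countWhileLt_spec (h : Int) (l : List Int) :
    ∃ c : Nat, countWhileLt h l = (c : Int) ∧ c ≤ l.length ∧
      (∀ p, p < c → l.getD p 0 < h) ∧
      (c < l.length → h ≤ l.getD c 0) := by
  induction l with
  | nil => exact ⟨0, by simp [countWhileLt], by simp, fun p hp => by omega, fun hc => by simp at hc⟩
  | cons v t ih =>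
    by_cases hv : h ≤ v
    · exact ⟨0, by simp [countWhileLt, hv], by simp,
        fun p hp => by omega, fun _ => by simpa using hv⟩
    · obtain ⟨c, h1, h2, h3, h4⟩ := ih
      refine ⟨c + 1, ?_, by simp; omega, ?_, ?_⟩
      · simp only [countWhileLt, if_neg hv, h1]; push_cast; ring
      · intro p hp
        cases p with
        | zero => simpa using (by omega : v < h)
        | succ p => simpa using h3 p (by omega)
      · intro hc
        simpa using h4 (by simpa using hc)

-- specL i as a window count: positions i-c..i-1 are < arr[i], position i-c-1 (if any) is >=
lemma specL_spec (arr : List Int) (i : Nat) (hi : i ≤ arr.length) :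
    ∃ c : Nat, specL arr i = (c : Int) ∧ c ≤ i ∧
      (∀ m : Nat, i - c ≤ m → m < i → arr.getD m 0 < arr.getD i 0) ∧
      (c < i → arr.getD i 0 ≤ arr.getD (i - c - 1) 0) := by
  obtain ⟨c, h1, h2, h3, h4⟩ := countWhileLt_spec (arr.getD i 0) (arr.take i).reverse
  rw [len_revtake arr i hi] at h2
  refine ⟨c, h1, h2, ?_, ?_⟩
  · intro m hm1 hm2
    have hx := h3 (i - 1 - m) (by omega)
    have hlt : i - 1 - m < ((arr.take i).reverse).length := by
      rw [len_revtake arr i hi]; omega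
    rwa [List.getD_eq_getElem _ _ hlt,
      getElem_revtake arr i (i - 1 - m) hi (by omega) hlt,
      (show i - 1 - (i - 1 - m) = m by omega)] at hx
  · intro hc
    have hlt : c < ((arr.take i).reverse).length := by
      rw [len_revtake arr i hi]; omega
    have hx := h4 hlt
    rwa [List.getD_eq_getElem _ _ hlt,
      getElem_revtake arr i c hi (by omega) hlt,
      (show i - 1 - c = i - c - 1 by omega)] at hx

-- specR i as a window count: positions i+1..i+c are < arr[i], position i+1+c (if any) is >=
lemma specR_spec (arr : List Int) (i : Nat) :
    ∃ c : Nat, specR arr i = (c : Int) ∧ c ≤ arr.length - (i + 1) ∧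
      (∀ m : Nat, i < m → m ≤ i + c → arr.getD m 0 < arr.getD i 0) ∧
      (i + 1 + c < arr.length → arr.getD i 0 ≤ arr.getD (i + 1 + c) 0) := by
  obtain ⟨c, h1, h2, h3, h4⟩ := countWhileLt_spec (arr.getD i 0) (arr.drop (i+1))
  rw [List.length_drop] at h2
  refine ⟨c, h1, h2, ?_, ?_⟩
  · intro m hm1 hm2
    have hx := h3 (m - (i + 1)) (by omega)
    have hlt : m - (i + 1) < (arr.drop (i + 1)).length := by
      rw [List.length_drop]; omega
    rwa [List.getD_eq_getElem _ _ hlt,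
      getElem_dropsucc arr i (m - (i + 1)) hlt,
      (show i + 1 + (m - (i + 1)) = m by omega)] at hx
  · intro hc
    have hlt : c < (arr.drop (i + 1)).length := by
      rw [List.length_drop]; omega
    have hx := h4 hlt
    rwa [List.getD_eq_getElem _ _ hlt,
      getElem_dropsucc arr i c hlt] at hx

-- B's left jump loop lands exactly on prevVal arr i
lemma jumpPrev_eq (arr L : List Int) (i : Nat) (hi : i < arr.length)
    (hL : ∀ j : Nat, j < i → L.getD j 0 = prevVal arr j) :
    ∀ (fuel : Nat) (j : Int), -1 ≤ j → j < i → j + 2 ≤ (fuel : Int) →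
      (∀ m : Nat, j < (m : Int) → m < i → arr.getD m 0 < arr.getD i 0) →
      jumpPrev arr L (arr.getD i 0) fuel j = prevVal arr i := by
  intro fuel
  induction fuel with
  | zero => intro j h1 _ h3 _; exfalso; push_cast at h3; omega
  | succ fuel ih =>
    intro j h1 h2 h3 hwin
    obtain ⟨c, hcL, hcle, hbet, hbar⟩ := specL_spec arr i (le_of_lt hi)
    have hg : prevVal arr i = (i : Int) - c - 1 := by unfold prevVal; rw [hcL]
    have hjg : prevVal arr i ≤ j := by
      by_contra hcon
      rw [not_le, hg] at hcon
      have hci : c < i := by omega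
      have hmi : ((i - c - 1 : Nat) : Int) = (i : Int) - c - 1 := by omega
      have h5 := hwin (i - c - 1) (by omega) (by omega)
      have h6 := hbar hci
      omega
    simp only [jumpPrev]
    by_cases hj1 : j = -1
    · rw [if_pos hj1]
      rw [hg] at hjg ⊢
      omega
    · rw [if_neg hj1]
      have hj0 : 0 ≤ j := by omega
      have hjn : ((j.toNat : Nat) : Int) = j := Int.toNat_of_nonneg hj0
      by_cases hlt : arr.getD j.toNat 0 < arr.getD i 0
      · rw [if_pos hlt]
        have hjg' : prevVal arr i < j := by
          rcases lt_or_eq_of_le hjg with h | h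
          · exact h
          · exfalso
            have hci : c < i := by rw [hg] at h; omega
            have h6 := hbar hci
            have : (i - c - 1 : Nat) = j.toNat := by rw [hg] at h; omega
            rw [this] at h6
            omega
        have hjlti : j.toNat < i := by omega
        rw [hL j.toNat hjlti]
        obtain ⟨cj, hcjL, hcjle, hbetj, _⟩ := specL_spec arr j.toNat (by omega)
        have hpv : prevVal arr j.toNat = (j.toNat : Int) - cj - 1 := by unfold prevVal; rw [hcjL]
        refine ih (prevVal arr j.toNat) (by omega) (by omega) (by omega) ?_
        intro m hm1 hm2
        by_cases hmj : j < (m : Int)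
        · exact hwin m hmj hm2
        · by_cases hmj2 : (m : Int) = j
          · have : m = j.toNat := by omega
            rwa [this]
          · have hmlt : m < j.toNat := by omega
            have : arr.getD m 0 < arr.getD j.toNat 0 :=
              hbetj m (by rw [hpv] at hm1; omega) hmlt
            omega
      · rw [if_neg hlt]
        rcases lt_or_eq_of_le hjg with h | h
        · exfalso
          rw [hg] at h
          have := hbet j.toNat (by omega) (by omega)
          omega
        · omega

-- B's right jump loop lands exactly on nxtVal arr i
lemma jumpNext_eq (arr L : List Int) (i : Nat) (hi : i < arr.length)
    (hL : ∀ j : Nat, i < j → j < arr.length → L.getD j 0 = nxtVal arr j) :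
    ∀ (fuel : Nat) (j : Int), (i : Int) < j → j ≤ (arr.length : Int) →
      (arr.length : Int) - j + 1 ≤ (fuel : Int) →
      (∀ m : Nat, (i : Int) < m → (m : Int) < j → arr.getD m 0 < arr.getD i 0) →
      jumpNext arr L (arr.getD i 0) fuel j = nxtVal arr i := by
  intro fuel
  induction fuel with
  | zero => intro j _ h2 h3 _; exfalso; push_cast at h3; omega
  | succ fuel ih =>
    intro j h1 h2 h3 hwin
    obtain ⟨c, hcL, hcle, hbet, hbar⟩ := specR_spec arr i
    have hg : nxtVal arr i = (i : Int) + c + 1 := by unfold nxtVal; rw [hcL]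
    have hjg : j ≤ nxtVal arr i := by
      by_contra hcon
      rw [not_le, hg] at hcon
      have hci : i + 1 + c < arr.length := by omega
      have h5 := hwin (i + 1 + c) (by push_cast; omega) (by push_cast; omega)
      have h6 := hbar hci
      omega
    simp only [jumpNext]
    by_cases hj1 : j = (arr.length : Int)
    · rw [if_pos hj1]
      rw [hg] at hjg ⊢
      omega
    · rw [if_neg hj1]
      have hj0 : 0 ≤ j := by omega
      have hjn : ((j.toNat : Nat) : Int) = j := Int.toNat_of_nonneg hj0
      by_cases hlt : arr.getD j.toNat 0 < arr.getD i 0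
      · rw [if_pos hlt]
        have hjg' : j < nxtVal arr i := by
          rcases lt_or_eq_of_le hjg with h | h
          · exact h
          · exfalso
            have hci : i + 1 + c < arr.length := by omega
            have h6 := hbar hci
            have : i + 1 + c = j.toNat := by rw [hg] at h; omega
            rw [this] at h6
            omega
        have hjlti : i < j.toNat ∧ j.toNat < arr.length := by omega
        rw [hL j.toNat hjlti.1 hjlti.2]
        obtain ⟨cj, hcjL, hcjle, hbetj, _⟩ := specR_spec arr j.toNat
        have hpv : nxtVal arr j.toNat = (j.toNat : Int) + cj + 1 := by unfold nxtVal; rw [hcjL]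
        refine ih (nxtVal arr j.toNat) (by omega) (by omega) (by omega) ?_
        intro m hm1 hm2
        by_cases hmj : (m : Int) < j
        · exact hwin m hm1 hmj
        · by_cases hmj2 : (m : Int) = j
          · have : m = j.toNat := by omega
            rwa [this]
          · have hmgt : j.toNat < m := by omega
            have : arr.getD m 0 < arr.getD j.toNat 0 :=
              hbetj m hmgt (by rw [hpv] at hm2; omega)
            omega
      · rw [if_neg hlt]
        rcases lt_or_eq_of_le hjg with h | h
        · exfalso
          rw [hg] at h
          have := hbet j.toNat (by omega) (by omega)
          omega
        · omega

lemma set_at_junction {α : Type} (l1 : List α) (a b : α) (l2 : List α) :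
    (l1 ++ a :: l2).set l1.length b = l1 ++ b :: l2 := by
  induction l1 with
  | nil => simp
  | cons x t ih => simp [ih]

lemma getD_map_range_left (f : Nat → Int) (i j : Nat) (l2 : List Int) (hj : j < i) :
    (((List.range i).map f) ++ l2).getD j 0 = f j := by
  rw [List.getD_eq_getElem _ _ (by simp; omega),
    List.getElem_append_left (by simp; omega)]
  simp

-- B's first pass fills prev with prevVal
lemma prevFold (arr : List Int) (i : Nat) (hi : i ≤ arr.length) :
    (List.range i).foldl
        (fun p k => p.set k (jumpPrev arr p (arr.getD k 0) (k + 1) ((k : Int) - 1)))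
        (List.replicate arr.length (-1)) =
      (List.range i).map (prevVal arr) ++ List.replicate (arr.length - i) (-1) := by
  induction i with
  | zero => simp
  | succ i ih =>
    rw [List.range_succ, List.foldl_append, ih (by omega)]
    simp only [List.foldl_cons, List.foldl_nil]
    have hrep : List.replicate (arr.length - i) (-1 : Int) =
        (-1 : Int) :: List.replicate (arr.length - (i + 1)) (-1) := by
      rw [← List.replicate_succ]
      congr 1
      omega
    rw [hrep]
    have hlen : ((List.range i).map (prevVal arr)).length = i := by simp
    have hjump : jumpPrev arr ((List.range i).map (prevVal arr) ++
          (-1 : Int) :: List.replicate (arr.length - (i + 1)) (-1))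
          (arr.getD i 0) (i + 1) ((i : Int) - 1) = prevVal arr i := by
      refine jumpPrev_eq arr _ i (by omega) ?_ (i + 1) ((i : Int) - 1)
        (by omega) (by omega) (by push_cast; omega) ?_
      · intro j hj
        rw [getD_map_range_left (prevVal arr) i j _ hj]
      · intro m hm1 hm2
        exfalso
        omega
    have hset := set_at_junction ((List.range i).map (prevVal arr)) (-1 : Int)
      (jumpPrev arr ((List.range i).map (prevVal arr) ++
          (-1 : Int) :: List.replicate (arr.length - (i + 1)) (-1))
        (arr.getD i 0) (i + 1) ((i : Int) - 1))
      (List.replicate (arr.length - (i + 1)) (-1))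
    rw [hlen] at hset
    rw [hset, hjump]
    simp

lemma getD_rep_map_right (arr : List Int) (i j : Nat) (hij : i ≤ j) (hj : j < arr.length) :
    (List.replicate i ((arr.length : Int)) ++
        (List.range' i (arr.length - i)).map (nxtVal arr)).getD j 0 = nxtVal arr j := by
  rw [List.getD_eq_getElem _ _ (by simp; omega),
    List.getElem_append_right (by simp; omega)]
  simp only [List.getElem_map, List.length_replicate, List.getElem_range']
  congr 1
  omega

-- B's second pass fills nxt with nxtVal
lemma nxtFold (arr : List Int) (i : Nat) (hi : i ≤ arr.length) :
    (List.range' i (arr.length - i)).reverse.foldl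
        (fun q k => q.set k (jumpNext arr q (arr.getD k 0) (arr.length - k) ((k : Int) + 1)))
        (List.replicate arr.length ((arr.length : Int))) =
      List.replicate i ((arr.length : Int)) ++
        (List.range' i (arr.length - i)).map (nxtVal arr) := by
  have key : ∀ (d i : Nat), arr.length ≤ i + d → i ≤ arr.length →
      (List.range' i (arr.length - i)).reverse.foldl
          (fun q k => q.set k (jumpNext arr q (arr.getD k 0) (arr.length - k) ((k : Int) + 1)))
          (List.replicate arr.length ((arr.length : Int))) =
        List.replicate i ((arr.length : Int)) ++
          (List.range' i (arr.length - i)).map (nxtVal arr) := by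
    intro d
    induction d with
    | zero =>
      intro i hgood hile
      have h0 : arr.length - i = 0 := by omega
      have h1 : i = arr.length := by omega
      rw [h0]
      simp [h1]
    | succ d ih =>
      intro i hgood hile
      by_cases h : i < arr.length
      · have hc : arr.length - i = (arr.length - (i + 1)) + 1 := by omega
        rw [hc, List.range'_succ, List.reverse_cons, List.foldl_append,
          ih (i + 1) (by omega) (by omega)]
        simp only [List.foldl_cons, List.foldl_nil]
        have hrep : List.replicate (i + 1) ((arr.length : Int)) =
            List.replicate i ((arr.length : Int)) ++ [(arr.length : Int)] := by
          rw [List.replicate_succ']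
        have hjump : jumpNext arr (List.replicate (i + 1) ((arr.length : Int)) ++
              (List.range' (i + 1) (arr.length - (i + 1))).map (nxtVal arr))
              (arr.getD i 0) (arr.length - i) ((i : Int) + 1) = nxtVal arr i := by
          refine jumpNext_eq arr _ i h ?_ (arr.length - i) ((i : Int) + 1)
            (by omega) (by omega) (by omega) ?_
          · intro j hj1 hj2
            exact getD_rep_map_right arr (i + 1) j (by omega) hj2
          · intro m hm1 hm2
            exfalso
            omega
        have hset := set_at_junction (List.replicate i ((arr.length : Int)))
          ((arr.length : Int)) (nxtVal arr i)
          ((List.range' (i + 1) (arr.length - (i + 1))).map (nxtVal arr))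
        rw [List.length_replicate] at hset
        rw [hjump]
        have hsplit : List.replicate (i + 1) ((arr.length : Int)) ++
              (List.range' (i + 1) (arr.length - (i + 1))).map (nxtVal arr) =
            List.replicate i ((arr.length : Int)) ++ (arr.length : Int) ::
              (List.range' (i + 1) (arr.length - (i + 1))).map (nxtVal arr) := by
          rw [hrep, List.append_assoc, List.singleton_append]
        rw [hsplit, hset, List.map_cons]
      · have h0 : arr.length - i = 0 := by omega
        have h1 : i = arr.length := by omega
        rw [h0]
        simp [h1]
  exact key arr.length i (by omega) hi

-- ===== VERDICT (by name: the statement is the Claim_ definition above) =====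
theorem maxPeople_spec : Claim_equal_maxPeople := by
  intro arr _
  unfold Spec_maxPeople
  have hL := leftFold arr arr.length le_rfl
  have hR := rightFold arr 0 (Nat.zero_le _)
  simp only [Nat.sub_zero, ← List.range_eq_range'] at hR
  have hP := prevFold arr arr.length le_rfl
  have hN := nxtFold arr 0 (Nat.zero_le _)
  simp only [Nat.sub_self, List.replicate_zero, List.append_nil] at hP
  simp only [Nat.sub_zero, ← List.range_eq_range', List.replicate_zero, List.nil_append] at hN
  simp only [maxPeople, maxPeople_alt, hL, hR, hP, hN]
  refine PySem.List.foldl_congr_mem' _ _ _ _ ?_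
  intro i hi acc
  have hi' : i < arr.length := List.mem_range.mp hi
  rw [List.getD_eq_getElem _ _ (by simpa using hi'), List.getD_eq_getElem _ _ (by simpa using hi'),
    List.getD_eq_getElem _ _ (by simpa using hi'), List.getD_eq_getElem _ _ (by simpa using hi')]
  simp only [List.getElem_map, List.getElem_range]
  unfold prevVal nxtVal
  ring_nf
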